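-- pv_equiv track=rewrite | github.com/frailove/PrecomControl | routes/test_package_routes.py | normalize_block_for_matching
-- ===== SOURCE A (Python) =====
-- def normalize_block_for_matching(block):
--     if not block:
--         return None
--     parts = [p.strip() for p in str(block).split('-') if p.strip()]
--     if len(parts) == 3:
--         return '-'.join([parts[1], parts[2], parts[0]])
--     if len(parts) == 2:
--         return '-'.join([parts[1], parts[0]])
--     if len(parts) == 1:
--         return parts[0]
--     if len(parts) > 3:
--         return '-'.join(parts[1:] + [parts[0]])
--     return None
-- ===== SOURCE B (Python) =====
-- def normalize_block_for_matching(block):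
--     # Single char-level scan: stream tokens, hold the first aside, append the
--     # rest to the output as they complete, then emit tail + first.
--     if not block:
--         return None
--     first = None
--     tail = ""
--     tok = ""
--     for ch in str(block) + "-":
--         if ch == "-":
--             t = tok.strip()
--             tok = ""
--             if t:
--                 if first is None:
--                     first = t
--                 else:
--                     tail = tail + t + "-"
--         else:
--             tok = tok + ch
--     if first is None:
--         return None
--     return tail + first
-- ===== Notes on version B (the rewrite author's own statement) =====
-- stated objective: alternative
-- what changed: B replaces A's staged pipeline (split on '-', strip each piece, filter empties, then a four-way length case analysis that rotates the list) with a single character-level scan: a state machine that completes tokens on the fly, keeps the first token aside, appends every later token directly to the output accumulator, and finally emits tail + first; no parts list and no length branching exist in B.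
import Mathlib
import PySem

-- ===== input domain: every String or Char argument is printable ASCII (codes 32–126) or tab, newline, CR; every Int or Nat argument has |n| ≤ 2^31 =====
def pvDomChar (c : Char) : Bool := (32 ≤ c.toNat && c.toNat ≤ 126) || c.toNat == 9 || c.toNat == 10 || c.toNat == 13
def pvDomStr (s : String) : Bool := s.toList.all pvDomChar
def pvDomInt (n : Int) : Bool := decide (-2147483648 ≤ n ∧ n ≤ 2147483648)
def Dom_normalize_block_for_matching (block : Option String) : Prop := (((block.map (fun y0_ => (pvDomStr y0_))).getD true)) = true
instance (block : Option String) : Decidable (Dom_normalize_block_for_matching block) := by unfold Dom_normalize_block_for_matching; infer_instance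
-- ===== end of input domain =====

-- B replaces A's split/strip/filter + length case analysis by a single character-level
-- state-machine scan that streams tokens and emits tail + first (objective: alternative).
-- ===== PORT A =====
-- split? with separator "-" never returns none (sep nonempty); getD [] is exact here
def pvParts (s : String) : List String :=
  (((PySem.Str.split? s "-").getD []).map PySem.Str.strip).filter (fun p => !(p == ""))

def normalize_block_for_matching (block : Option String) : Option String :=
  match block with
  | none => none
  | some s =>
    if s == "" then none
    else
      let parts := pvParts s
      if parts.length == 3 then
        some (PySem.Str.join "-" [PySem.List.pyGetD parts 1 "", PySem.List.pyGetD parts 2 "", PySem.List.pyGetD parts 0 ""])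
      else if parts.length == 2 then
        some (PySem.Str.join "-" [PySem.List.pyGetD parts 1 "", PySem.List.pyGetD parts 0 ""])
      else if parts.length == 1 then
        some (PySem.List.pyGetD parts 0 "")
      else if parts.length > 3 then
        some (PySem.Str.join "-" (PySem.List.slice parts (some 1) none ++ [PySem.List.pyGetD parts 0 ""]))
      else none

-- ===== PORT B =====
-- one fold step of Source B's for-loop; state = (first, tail, tok), strings kept as List Char
-- (PySem convention: string work is done on the toList side)
def nbfmStep (st : Option (List Char) × List Char × List Char) (ch : Char) :
    Option (List Char) × List Char × List Char :=
  if ch == '-' then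
    let t := PySem.Chars.strip st.2.2
    if t == [] then (st.1, st.2.1, [])
    else
      match st.1 with
      | none => (some t, st.2.1, [])
      | some _ => (st.1, st.2.1 ++ t ++ ['-'], [])
  else (st.1, st.2.1, st.2.2 ++ [ch])

def normalize_block_for_matching_alt (block : Option String) : Option String :=
  match block with
  | none => none
  | some s =>
    if s == "" then none
    else
      let fin := (s.toList ++ ['-']).foldl nbfmStep (none, [], [])
      match fin.1 with
      | none => none
      | some f => some (String.ofList (fin.2.1 ++ f))

-- ===== PRECONDITION & SPEC =====
def Spec_normalize_block_for_matching (block : Option String) (out : Option String) : Prop := out = normalize_block_for_matching_alt block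
instance (block : Option String) (out : Option String) : Decidable (Spec_normalize_block_for_matching block out) := by unfold Spec_normalize_block_for_matching; infer_instance

-- ===== CLAIM (what is proved, stated in full; the proofs are below) =====
def Claim_equal_normalize_block_for_matching : Prop := ∀ (block : Option String), Dom_normalize_block_for_matching block → Spec_normalize_block_for_matching block (normalize_block_for_matching block)

-- ===== LEMMAS AND PROOFS =====

-- prepend a prefix onto the head piece (empty piece-list: the prefix is the sole piece)
def consH (p : List Char) : List (List Char) → List (List Char)
  | [] => [p]
  | t :: ts => (p ++ t) :: ts

-- structural single-char split on '-' (reference model for PySem.Chars.splitOn _ ['-'])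
def sp : List Char → List (List Char)
  | [] => [[]]
  | c :: r => if c = '-' then [] :: sp r else consH [c] (sp r)

theorem sp_ne_nil (l : List Char) : sp l ≠ [] := by
  cases l with
  | nil => simp [sp]
  | cons c r =>
    simp only [sp]
    split
    · simp
    · cases h : sp r <;> simp [consH]

theorem consH_consH (a b : List Char) (xs : List (List Char)) :
    consH a (consH b xs) = consH (a ++ b) xs := by
  cases xs <;> simp [consH]

theorem consH_nil_of_ne_nil (xs : List (List Char)) (h : xs ≠ []) : consH [] xs = xs := by
  cases xs with
  | nil => exact absurd rfl h
  | cons t ts => simp [consH]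


theorem go_single (fuel : Nat) (l cur : List Char) (acc : List (List Char))
    (h : l.length ≤ fuel) :
    PySem.Chars.splitOn.go ['-'] fuel l cur acc = acc.reverse ++ consH cur.reverse (sp l) := by
  induction fuel generalizing l cur acc with
  | zero =>
    have : l = [] := List.eq_nil_of_length_eq_zero (Nat.le_zero.mp h)
    subst this
    simp [PySem.Chars.splitOn.go, sp, consH]
  | succ f ih =>
    cases l with
    | nil => simp [PySem.Chars.splitOn.go, sp, consH]
    | cons c rest =>
      by_cases hc : c = '-'
      · subst hc
        rw [PySem.Chars.splitOn.go]
        simp only [List.isPrefixOf, Bool.and_true, beq_self_eq_true, if_pos,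
          List.length_singleton, List.drop_one, List.tail_cons]
        rw [ih rest [] (cur.reverse :: acc) (by simpa using Nat.lt_succ_iff.mp (by simpa using h))]
        rw [List.reverse_nil, consH_nil_of_ne_nil _ (sp_ne_nil rest)]
        rw [show sp ('-' :: rest) = [] :: sp rest by simp [sp]]
        simp [consH]
      · rw [PySem.Chars.splitOn.go]
        have hpre : List.isPrefixOf ['-'] (c :: rest) = false := by
          have hbc : ('-' == c) = false := beq_eq_false_iff_ne.mpr (fun h => hc h.symm)
          simp [List.isPrefixOf, hbc]
        simp only [hpre, Bool.false_eq_true, if_false]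
        rw [ih rest (c :: cur) acc (by simpa using Nat.lt_succ_iff.mp (by simpa using h))]
        rw [show sp (c :: rest) = consH [c] (sp rest) by simp [sp, hc]]
        rw [consH_consH]
        simp only [List.reverse_cons]

theorem splitOn_single (cs : List Char) : PySem.Chars.splitOn cs ['-'] = sp cs := by
  unfold PySem.Chars.splitOn
  rw [go_single _ _ _ _ (by omega)]
  simp [consH_nil_of_ne_nil _ (sp_ne_nil cs)]

-- token-level step: what nbfmStep does when a token t completes
def emit (st : Option (List Char) × List Char) (t : List Char) :
    Option (List Char) × List Char :=
  let s := PySem.Chars.strip t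
  if s = [] then st
  else
    match st.1 with
    | none => (some s, st.2)
    | some _ => (st.1, st.2 ++ s ++ ['-'])

theorem scan_eq_emit (cs : List Char) (fi : Option (List Char)) (ta tok : List Char) :
    (cs ++ ['-']).foldl nbfmStep (fi, ta, tok)
      = (let r := List.foldl emit (fi, ta) (consH tok (sp cs)); (r.1, r.2, [])) := by
  induction cs generalizing fi ta tok with
  | nil =>
    simp only [List.nil_append, List.foldl_cons, List.foldl_nil, sp, consH, List.append_nil]
    simp only [nbfmStep, emit]
    by_cases h : PySem.Chars.strip tok = []
    · simp [h]
    · cases fi <;> simp [h]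
  | cons c r ih =>
    by_cases hc : c = '-'
    · subst hc
      simp only [List.cons_append, List.foldl_cons]
      have hstep : nbfmStep (fi, ta, tok) '-' =
          ((emit (fi, ta) tok).1, (emit (fi, ta) tok).2, []) := by
        simp only [nbfmStep, emit]
        by_cases h : PySem.Chars.strip tok = []
        · simp [h]
        · cases fi <;> simp [h]
      rw [hstep, ih]
      have h1 : consH tok ([] :: sp r) = tok :: sp r := by simp [consH]
      simp [sp, h1, consH_nil_of_ne_nil _ (sp_ne_nil r)]
    · simp only [List.cons_append, List.foldl_cons]
      have hstep : nbfmStep (fi, ta, tok) c = (fi, ta, tok ++ [c]) := by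
        simp [nbfmStep, hc]
      rw [hstep, ih]
      simp [sp, hc, consH_consH]

-- folding emit over raw pieces = folding the already-stripped nonempty tokens
def emit2 (st : Option (List Char) × List Char) (q : List Char) :
    Option (List Char) × List Char :=
  match st.1 with
  | none => (some q, st.2)
  | some _ => (st.1, st.2 ++ q ++ ['-'])

theorem foldl_emit_eq (ps : List (List Char)) (st : Option (List Char) × List Char) :
    List.foldl emit st ps
      = List.foldl emit2 st ((ps.map PySem.Chars.strip).filter (fun q => !(q == []))) := by
  induction ps generalizing st with
  | nil => rfl
  | cons t ps ih =>
    by_cases h : PySem.Chars.strip t = []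
    · simp [List.foldl_cons, emit, h, ih]
    · have h2 : emit st t = emit2 st (PySem.Chars.strip t) := by
        cases hst : st.1 <;> simp [emit, emit2, h, hst]
      simp [List.foldl_cons, h, h2, ih]

theorem foldl_emit2_some (rest : List (List Char)) (q ta : List Char) :
    List.foldl emit2 (some q, ta) rest
      = (some q, ta ++ rest.flatMap (fun t => t ++ ['-'])) := by
  induction rest generalizing ta with
  | nil => simp
  | cons b bs ih => simp [List.foldl_cons, emit2, ih, List.flatMap_cons]

theorem intercalate_cons_ne_nil (b : List Char) (l : List (List Char)) (h : l ≠ []) :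
    (['-'] : List Char).intercalate (b :: l) = b ++ '-' :: ['-'].intercalate l := by
  cases l with
  | nil => exact absurd rfl h
  | cons c cs => simp [List.intercalate, List.intersperse]

theorem intercalate_rot (rest : List (List Char)) (q : List Char) :
    (['-'] : List Char).intercalate (rest ++ [q])
      = rest.flatMap (fun t => t ++ ['-']) ++ q := by
  induction rest with
  | nil => simp [List.intercalate]
  | cons b bs ih =>
    rw [List.cons_append, intercalate_cons_ne_nil b (bs ++ [q]) (by simp), ih]
    simp [List.flatMap_cons]

theorem join_ofList (ps : List (List Char)) :
    PySem.Str.join "-" (ps.map String.ofList) = String.ofList ((['-'] : List Char).intercalate ps) := by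
  simp [PySem.Str.join, PySem.Chars.join, List.map_map, Function.comp_def]

-- A's parts list, on the List Char side
theorem pvParts_eq (s : String) :
    pvParts s = ((((sp s.toList).map PySem.Chars.strip).filter (fun q => !(q == []))).map String.ofList) := by
  unfold pvParts
  rw [show PySem.Str.split? s "-" = some ((sp s.toList).map String.ofList) by
    simp [PySem.Str.split?, PySem.Chars.split?, splitOn_single]]
  rw [Option.getD_some, List.map_map]
  have hfun : (PySem.Str.strip ∘ String.ofList) = (String.ofList ∘ PySem.Chars.strip) := by
    funext x; simp [PySem.Str.strip, Function.comp]
  rw [hfun, ← List.map_map, List.filter_map]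
  congr 1
  apply List.filter_congr
  intro x _
  cases x <;> simp [String.ofList_eq_empty_iff]

-- ===== VERDICT (by name: the statement is the Claim_ definition above) =====
theorem normalize_block_for_matching_spec : Claim_equal_normalize_block_for_matching := by
  intro block _
  unfold Spec_normalize_block_for_matching
  cases block with
  | none => rfl
  | some s =>
    show normalize_block_for_matching (some s) = normalize_block_for_matching_alt (some s)
    by_cases hs : s == ""
    · simp [normalize_block_for_matching, normalize_block_for_matching_alt, hs]
    · unfold normalize_block_for_matching normalize_block_for_matching_alt
      simp only [hs, Bool.false_eq_true, if_false]
      rw [scan_eq_emit, consH_nil_of_ne_nil _ (sp_ne_nil s.toList), foldl_emit_eq, pvParts_eq]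
      rcases hq : ((sp s.toList).map PySem.Chars.strip).filter (fun q => !(q == [])) with _ | ⟨q, rest⟩
      · simp
      · simp only [List.foldl_cons, emit2, List.map_cons]
        rw [foldl_emit2_some]
        rcases rest with _ | ⟨b, _ | ⟨c, _ | ⟨d, more⟩⟩⟩
        · simp [PySem.List.pyGetD_ofNat']
        · simp only [List.map_cons, List.map_nil, List.length_cons, List.length_nil]
          norm_num
          simp only [PySem.List.pyGetD_ofNat', List.getD_cons_zero, List.getD_cons_succ]
          rw [show ([String.ofList b, String.ofList q] : List String)
                = ([b, q].map String.ofList) by simp]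
          rw [join_ofList, show ([b, q] : List (List Char)) = [b] ++ [q] from rfl, intercalate_rot]
          simp
        · simp only [List.map_cons, List.map_nil, List.length_cons, List.length_nil]
          norm_num
          simp only [PySem.List.pyGetD_ofNat', List.getD_cons_zero, List.getD_cons_succ]
          rw [show ([String.ofList b, String.ofList c, String.ofList q] : List String)
                = ([b, c, q].map String.ofList) by simp]
          rw [join_ofList, show ([b, c, q] : List (List Char)) = [b, c] ++ [q] from rfl, intercalate_rot]
          simp
        · simp only [List.map_cons, List.length_cons]
          norm_num
          rw [if_neg (by omega), if_neg (by omega)]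
          rw [show PySem.List.slice
                (String.ofList q :: String.ofList b :: String.ofList c :: String.ofList d :: more.map String.ofList)
                (some 1)
              = String.ofList b :: String.ofList c :: String.ofList d :: more.map String.ofList by
            simp [PySem.List.slice]]
          rw [show (String.ofList b :: String.ofList c :: String.ofList d :: more.map String.ofList
                ++ [String.ofList q])
              = ((b :: c :: d :: more ++ [q]).map String.ofList) by simp]
          rw [join_ofList, intercalate_rot]
          simp
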